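-- pv_equiv track=rewrite | github.com/osuperu/guweb | common/utils.py | get_mods
-- ===== SOURCE A (Python) =====
-- mod_dict = {
--     1: "NF",
--     2: "EZ",
--     4: "TD",
--     8: "HD",
--     16: "HR",
--     32: "SD",
--     64: "DT",
--     128: "RX",
--     256: "HT",
--     512: "NC",
--     1024: "FL",
--     2048: "AP",
--     4096: "SO",
--     8192: "AP",
--     16384: "PF",
--     32768: "4K",
--     65536: "5K",
--     131072: "6K",
--     262144: "7K",
--     524288: "8K",
--     1015808: "",
--     1048576: "FD",
--     2097152: "RD",
--     4194304: "CN",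
--     16777216: "9K",
--     33554432: "10K",
--     67108864: "1K",
--     134217728: "3K",
--     268435456: "2K",
--     536870912: "V2",
-- }
--
-- def get_mods(mods_int):
--     mods = []
--
--     for mod_value, mod_str in mod_dict.items():
--         if mods_int & mod_value:
--             mods.append(mod_str)
--
--     mods_str = (
--         "".join(mods)
--         .replace("RXNC", "NCRX")
--         .replace("APNC", "NCAP")
--         .replace("HDHRNC", "HDNCHR")
--         .replace("NFNC", "NCNF")
--         .replace("DTNC", "NC")
--     )
--     return f"+{mods_str}" if mods else ""
-- ===== SOURCE B (Python) =====
-- # Table-driven by nibbles: the joined mod string is assembled from a precomputed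
-- # 8x16 lookup table (one combined string per nibble value), masked first; the
-- # replace chain and the "+" prefix are unchanged.
--
-- _MASK = 0x3F7FFFFF  # union of all single-mod bits (bits 0-29 except 23)
--
-- _NAMES = {
--     0: "NF", 1: "EZ", 2: "TD", 3: "HD", 4: "HR", 5: "SD", 6: "DT", 7: "RX",
--     8: "HT", 9: "NC", 10: "FL", 11: "AP", 12: "SO", 13: "AP", 14: "PF",
--     15: "4K", 16: "5K", 17: "6K", 18: "7K", 19: "8K", 20: "FD", 21: "RD",
--     22: "CN", 24: "9K", 25: "10K", 26: "1K", 27: "3K", 28: "2K", 29: "V2",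
-- }
--
-- _NIBBLE = [
--     [
--         "".join(
--             _NAMES[4 * p + b]
--             for b in range(4)
--             if (v >> b) & 1 and 4 * p + b in _NAMES
--         )
--         for v in range(16)
--     ]
--     for p in range(8)
-- ]
--
-- def get_mods(mods_int):
--     m = mods_int & _MASK
--     if not m:
--         return ""
--     s = "".join(_NIBBLE[p][(m >> (4 * p)) & 15] for p in range(8))
--     s = (
--         s.replace("RXNC", "NCRX")
--         .replace("APNC", "NCAP")
--         .replace("HDHRNC", "HDNCHR")
--         .replace("NFNC", "NCNF")
--         .replace("DTNC", "NC")
--     )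
--     return "+" + s
-- ===== Notes on version B (the rewrite author's own statement) =====
-- stated objective: alternative
-- what changed: B precomputes a nibble lookup table (one combined mod string per nibble position and value) and assembles the result from a fixed handful of table lookups on the masked input, instead of scanning the whole mod table and bit-testing every key; the replace chain and the plus-prefix are unchanged.
import Mathlib
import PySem

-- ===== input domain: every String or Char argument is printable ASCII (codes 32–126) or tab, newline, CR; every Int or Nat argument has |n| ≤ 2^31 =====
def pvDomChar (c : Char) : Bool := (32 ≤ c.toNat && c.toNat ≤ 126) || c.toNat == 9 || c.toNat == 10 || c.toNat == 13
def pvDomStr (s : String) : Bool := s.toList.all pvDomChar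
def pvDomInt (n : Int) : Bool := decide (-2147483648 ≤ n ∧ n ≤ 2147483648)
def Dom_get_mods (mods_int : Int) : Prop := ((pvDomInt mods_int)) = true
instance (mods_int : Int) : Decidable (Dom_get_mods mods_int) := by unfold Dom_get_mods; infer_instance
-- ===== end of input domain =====

-- B precomputes a nibble lookup table (one combined mod string per nibble
-- position and value) and assembles the result from a fixed handful of table
-- lookups on the masked input, instead of bit-testing every mod-table entry;
-- objective: alternative.

-- ===== PORT A =====
def modDict : List (Int × String) :=
  [(1, "NF"), (2, "EZ"), (4, "TD"), (8, "HD"), (16, "HR"), (32, "SD"), (64, "DT"),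
   (128, "RX"), (256, "HT"), (512, "NC"), (1024, "FL"), (2048, "AP"), (4096, "SO"),
   (8192, "AP"), (16384, "PF"), (32768, "4K"), (65536, "5K"), (131072, "6K"),
   (262144, "7K"), (524288, "8K"), (1015808, ""), (1048576, "FD"), (2097152, "RD"),
   (4194304, "CN"), (16777216, "9K"), (33554432, "10K"), (67108864, "1K"),
   (134217728, "3K"), (268435456, "2K"), (536870912, "V2")]

def get_mods (mods_int : Int) : String :=
  let mods := modDict.foldl
    (fun acc p => if PySem.Int.band mods_int p.1 ≠ 0 then acc ++ [p.2] else acc) []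
  let mods_str :=
    PySem.Str.replace (PySem.Str.replace (PySem.Str.replace (PySem.Str.replace
      (PySem.Str.replace (PySem.Str.join "" mods) "RXNC" "NCRX")
      "APNC" "NCAP") "HDHRNC" "HDNCHR") "NFNC" "NCNF") "DTNC" "NC"
  if mods ≠ [] then "+" ++ mods_str else ""

-- ===== PORT B =====
def bMask : Int := 1065353215  -- 0x3F7FFFFF

-- _NAMES: dict bit-position -> mod string
def bNames : PySem.Dict Int String :=
  PySem.Dict.ofList
  [(0, "NF"), (1, "EZ"), (2, "TD"), (3, "HD"), (4, "HR"), (5, "SD"), (6, "DT"),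
   (7, "RX"), (8, "HT"), (9, "NC"), (10, "FL"), (11, "AP"), (12, "SO"), (13, "AP"),
   (14, "PF"), (15, "4K"), (16, "5K"), (17, "6K"), (18, "7K"), (19, "8K"),
   (20, "FD"), (21, "RD"), (22, "CN"), (24, "9K"), (25, "10K"), (26, "1K"),
   (27, "3K"), (28, "2K"), (29, "V2")]

-- _NIBBLE: the nested comprehension; `_NAMES[k] for b in range(4) if (v>>b)&1
-- and k in _NAMES` is the filterMap over the guarded dict lookup (v, b ≥ 0, so
-- `v >> b` is `v >>> b.toNat` exactly)
def bNibble : List (List String) :=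
  (PySem.List.pyRange 0 8 1).map (fun p =>
    (PySem.List.pyRange 0 16 1).map (fun v =>
      PySem.Str.join "" ((PySem.List.pyRange 0 4 1).filterMap (fun b =>
        if PySem.Int.band (v >>> b.toNat) 1 ≠ 0 then
          PySem.Dict.get? bNames (4 * p + b) else none))))

-- _NIBBLE[p][(m >> 4*p) & 15]: both indices are provably in range (p < 8,
-- 0 ≤ (m >> 4p) & 15 < 16), so pyGet?'s IndexError branch is unreachable and
-- getD only supplies a dummy
def get_mods_alt (mods_int : Int) : String :=
  let m := PySem.Int.band mods_int bMask
  if m = 0 then ""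
  else
    let s := PySem.Str.join "" ((PySem.List.pyRange 0 8 1).map (fun p =>
      (PySem.List.pyGet? ((PySem.List.pyGet? bNibble p).getD [])
        (PySem.Int.band (m >>> (4 * p).toNat) 15)).getD ""))
    let s :=
      PySem.Str.replace (PySem.Str.replace (PySem.Str.replace (PySem.Str.replace
        (PySem.Str.replace s "RXNC" "NCRX")
        "APNC" "NCAP") "HDHRNC" "HDNCHR") "NFNC" "NCNF") "DTNC" "NC"
    "+" ++ s

-- ===== PRECONDITION & SPEC =====
def Spec_get_mods (mods_int : Int) (out : String) : Prop := out = get_mods_alt mods_int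
instance (mods_int : Int) (out : String) : Decidable (Spec_get_mods mods_int out) := by unfold Spec_get_mods; infer_instance

-- ===== CLAIM (what is proved, stated in full; the proofs are below) =====
def Claim_equal_get_mods : Prop := ∀ (mods_int : Int), Dom_get_mods mods_int → Spec_get_mods mods_int (get_mods mods_int)

-- ===== LEMMAS AND PROOFS =====

-- the masked input as a Nat; both programs' tests are bit-tests of this number
def pvN (a : Int) : Nat := (PySem.Int.band a bMask).toNat

theorem pvBandMask (a : Int) : PySem.Int.band a bMask = ((pvN a : Nat) : Int) := by
  have h : (0 : Int) ≤ PySem.Int.band a bMask := by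
    rw [PySem.Int.band_comm]
    exact PySem.Int.band_nonneg_of_nonneg_left _ (by norm_num [bMask])
  exact (Int.toNat_of_nonneg h).symm

-- x - (x &&& u) removes a sub-mask, so it is the xor
theorem pv_sub_and : ∀ x u : Nat, x - (x &&& u) = x ^^^ (x &&& u) := by
  intro x
  induction x using Nat.strong_induction_on with
  | _ x ih =>
    intro u
    rcases Nat.eq_zero_or_pos x with hx | hx
    · simp [hx]
    · have ihx := ih (x / 2) (Nat.div_lt_self hx (by omega)) (u / 2)
      have hand : (x &&& u) / 2 = x / 2 &&& u / 2 := Nat.and_div_two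
      have hxor : (x ^^^ (x &&& u)) / 2 = x / 2 ^^^ (x &&& u) / 2 := Nat.xor_div_two
      have hxorm : (x ^^^ (x &&& u)) % 2 = (x + (x &&& u)) % 2 := Nat.xor_mod_two_eq
      have handm : (x &&& u) % 2 ≤ x % 2 := by
        have h0 := Nat.testBit_land x u 0
        simp only [Nat.testBit_zero] at h0
        rcases Nat.mod_two_eq_zero_or_one x with h | h <;>
          rcases Nat.mod_two_eq_zero_or_one (x &&& u) with h' | h' <;> simp [h, h'] at h0 ⊢
      have hle2 : x / 2 &&& u / 2 ≤ x / 2 := Nat.and_le_left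
      have e1 := Nat.div_add_mod (x &&& u) 2
      have e2 := Nat.div_add_mod (x ^^^ (x &&& u)) 2
      have e3 := Nat.div_add_mod x 2
      rw [hand] at e1
      rw [hxor, hxorm, hand, ← ihx] at e2
      omega

-- PySem.Int.band with a sub-mask of bMask, as a Nat-level &&& with pvN
theorem pvBandToNat (a : Int) (k : Nat) (hk : k &&& 1065353215 = k) :
    PySem.Int.band a ((k : Nat) : Int) = ((pvN a &&& k : Nat) : Int) := by
  have hM : bMask = ((1065353215 : Nat) : Int) := by norm_num [bMask]
  have hkM : (1065353215 : Nat) &&& k = k := by rw [Nat.and_comm]; exact hk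
  by_cases ha : (0 : Int) ≤ a
  · have h1 : PySem.Int.band a ((k : Nat) : Int) = ((a.toNat &&& k : Nat) : Int) := by
      rw [PySem.Int.band_of_nonneg ha (Int.natCast_nonneg k)]
      simp
    have h2 : PySem.Int.band a bMask = ((a.toNat &&& 1065353215 : Nat) : Int) := by
      rw [hM, PySem.Int.band_of_nonneg ha (Int.natCast_nonneg _)]
      simp
    rw [h1, pvN, h2]
    simp only [Int.toNat_natCast]
    rw [Nat.and_assoc, hkM]
  · have h1 : PySem.Int.band a ((k : Nat) : Int) =
        ((k - (k &&& (-a - 1).toNat) : Nat) : Int) := by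
      rw [PySem.Int.band]
      rw [if_neg ha, if_pos (Int.natCast_nonneg k)]
      simp only [Int.toNat_natCast]
    have h2 : PySem.Int.band a bMask =
        ((1065353215 - (1065353215 &&& (-a - 1).toNat) : Nat) : Int) := by
      rw [hM, PySem.Int.band]
      rw [if_neg ha, if_pos (Int.natCast_nonneg _)]
      simp only [Int.toNat_natCast]
    rw [h1, pvN, h2]
    simp only [Int.toNat_natCast]
    congr 1
    set u := (-a - 1).toNat with hu
    rw [pv_sub_and k u, pv_sub_and 1065353215 u]
    apply Nat.eq_of_testBit_eq
    intro i
    have hbit : k.testBit i = (k.testBit i && Nat.testBit 1065353215 i) := by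
      conv_lhs => rw [← hk]
      simp
    simp only [Nat.testBit_land, Nat.testBit_xor]
    revert hbit
    cases k.testBit i <;> cases Nat.testBit 1065353215 i <;> cases u.testBit i <;> simp

theorem pvCondGen (a : Int) (ki : Int) (k i : Nat) (h1 : ki = (k : Int)) (h2 : k = 2 ^ i)
    (h3 : Nat.testBit 1065353215 i = true) :
    (PySem.Int.band a ki ≠ 0) ↔ (Nat.testBit (pvN a) i = true) := by
  subst h1; subst h2
  have hk : 2 ^ i &&& 1065353215 = 2 ^ i := by
    rw [Nat.two_pow_and, h3]; simp
  rw [pvBandToNat a _ hk]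
  rw [Nat.and_two_pow]
  cases h : Nat.testBit (pvN a) i
  · simp
  · simp only [iff_true, Bool.toNat_true, one_mul, ne_eq, Nat.cast_eq_zero]
    positivity

theorem pvCond_1 (a : Int) : (PySem.Int.band a 1 ≠ 0) ↔ (Nat.testBit (pvN a) 0 = true) :=
  pvCondGen a 1 1 0 (by norm_num) (by norm_num) (by decide)
theorem pvCond_2 (a : Int) : (PySem.Int.band a 2 ≠ 0) ↔ (Nat.testBit (pvN a) 1 = true) :=
  pvCondGen a 2 2 1 (by norm_num) (by norm_num) (by decide)
theorem pvCond_4 (a : Int) : (PySem.Int.band a 4 ≠ 0) ↔ (Nat.testBit (pvN a) 2 = true) :=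
  pvCondGen a 4 4 2 (by norm_num) (by norm_num) (by decide)
theorem pvCond_8 (a : Int) : (PySem.Int.band a 8 ≠ 0) ↔ (Nat.testBit (pvN a) 3 = true) :=
  pvCondGen a 8 8 3 (by norm_num) (by norm_num) (by decide)
theorem pvCond_16 (a : Int) : (PySem.Int.band a 16 ≠ 0) ↔ (Nat.testBit (pvN a) 4 = true) :=
  pvCondGen a 16 16 4 (by norm_num) (by norm_num) (by decide)
theorem pvCond_32 (a : Int) : (PySem.Int.band a 32 ≠ 0) ↔ (Nat.testBit (pvN a) 5 = true) :=
  pvCondGen a 32 32 5 (by norm_num) (by norm_num) (by decide)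
theorem pvCond_64 (a : Int) : (PySem.Int.band a 64 ≠ 0) ↔ (Nat.testBit (pvN a) 6 = true) :=
  pvCondGen a 64 64 6 (by norm_num) (by norm_num) (by decide)
theorem pvCond_128 (a : Int) : (PySem.Int.band a 128 ≠ 0) ↔ (Nat.testBit (pvN a) 7 = true) :=
  pvCondGen a 128 128 7 (by norm_num) (by norm_num) (by decide)
theorem pvCond_256 (a : Int) : (PySem.Int.band a 256 ≠ 0) ↔ (Nat.testBit (pvN a) 8 = true) :=
  pvCondGen a 256 256 8 (by norm_num) (by norm_num) (by decide)
theorem pvCond_512 (a : Int) : (PySem.Int.band a 512 ≠ 0) ↔ (Nat.testBit (pvN a) 9 = true) :=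
  pvCondGen a 512 512 9 (by norm_num) (by norm_num) (by decide)
theorem pvCond_1024 (a : Int) : (PySem.Int.band a 1024 ≠ 0) ↔ (Nat.testBit (pvN a) 10 = true) :=
  pvCondGen a 1024 1024 10 (by norm_num) (by norm_num) (by decide)
theorem pvCond_2048 (a : Int) : (PySem.Int.band a 2048 ≠ 0) ↔ (Nat.testBit (pvN a) 11 = true) :=
  pvCondGen a 2048 2048 11 (by norm_num) (by norm_num) (by decide)
theorem pvCond_4096 (a : Int) : (PySem.Int.band a 4096 ≠ 0) ↔ (Nat.testBit (pvN a) 12 = true) :=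
  pvCondGen a 4096 4096 12 (by norm_num) (by norm_num) (by decide)
theorem pvCond_8192 (a : Int) : (PySem.Int.band a 8192 ≠ 0) ↔ (Nat.testBit (pvN a) 13 = true) :=
  pvCondGen a 8192 8192 13 (by norm_num) (by norm_num) (by decide)
theorem pvCond_16384 (a : Int) : (PySem.Int.band a 16384 ≠ 0) ↔ (Nat.testBit (pvN a) 14 = true) :=
  pvCondGen a 16384 16384 14 (by norm_num) (by norm_num) (by decide)
theorem pvCond_32768 (a : Int) : (PySem.Int.band a 32768 ≠ 0) ↔ (Nat.testBit (pvN a) 15 = true) :=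
  pvCondGen a 32768 32768 15 (by norm_num) (by norm_num) (by decide)
theorem pvCond_65536 (a : Int) : (PySem.Int.band a 65536 ≠ 0) ↔ (Nat.testBit (pvN a) 16 = true) :=
  pvCondGen a 65536 65536 16 (by norm_num) (by norm_num) (by decide)
theorem pvCond_131072 (a : Int) : (PySem.Int.band a 131072 ≠ 0) ↔ (Nat.testBit (pvN a) 17 = true) :=
  pvCondGen a 131072 131072 17 (by norm_num) (by norm_num) (by decide)
theorem pvCond_262144 (a : Int) : (PySem.Int.band a 262144 ≠ 0) ↔ (Nat.testBit (pvN a) 18 = true) :=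
  pvCondGen a 262144 262144 18 (by norm_num) (by norm_num) (by decide)
theorem pvCond_524288 (a : Int) : (PySem.Int.band a 524288 ≠ 0) ↔ (Nat.testBit (pvN a) 19 = true) :=
  pvCondGen a 524288 524288 19 (by norm_num) (by norm_num) (by decide)
theorem pvCond_1048576 (a : Int) : (PySem.Int.band a 1048576 ≠ 0) ↔ (Nat.testBit (pvN a) 20 = true) :=
  pvCondGen a 1048576 1048576 20 (by norm_num) (by norm_num) (by decide)
theorem pvCond_2097152 (a : Int) : (PySem.Int.band a 2097152 ≠ 0) ↔ (Nat.testBit (pvN a) 21 = true) :=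
  pvCondGen a 2097152 2097152 21 (by norm_num) (by norm_num) (by decide)
theorem pvCond_4194304 (a : Int) : (PySem.Int.band a 4194304 ≠ 0) ↔ (Nat.testBit (pvN a) 22 = true) :=
  pvCondGen a 4194304 4194304 22 (by norm_num) (by norm_num) (by decide)
theorem pvCond_16777216 (a : Int) : (PySem.Int.band a 16777216 ≠ 0) ↔ (Nat.testBit (pvN a) 24 = true) :=
  pvCondGen a 16777216 16777216 24 (by norm_num) (by norm_num) (by decide)
theorem pvCond_33554432 (a : Int) : (PySem.Int.band a 33554432 ≠ 0) ↔ (Nat.testBit (pvN a) 25 = true) :=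
  pvCondGen a 33554432 33554432 25 (by norm_num) (by norm_num) (by decide)
theorem pvCond_67108864 (a : Int) : (PySem.Int.band a 67108864 ≠ 0) ↔ (Nat.testBit (pvN a) 26 = true) :=
  pvCondGen a 67108864 67108864 26 (by norm_num) (by norm_num) (by decide)
theorem pvCond_134217728 (a : Int) : (PySem.Int.band a 134217728 ≠ 0) ↔ (Nat.testBit (pvN a) 27 = true) :=
  pvCondGen a 134217728 134217728 27 (by norm_num) (by norm_num) (by decide)
theorem pvCond_268435456 (a : Int) : (PySem.Int.band a 268435456 ≠ 0) ↔ (Nat.testBit (pvN a) 28 = true) :=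
  pvCondGen a 268435456 268435456 28 (by norm_num) (by norm_num) (by decide)
theorem pvCond_536870912 (a : Int) : (PySem.Int.band a 536870912 ≠ 0) ↔ (Nat.testBit (pvN a) 29 = true) :=
  pvCondGen a 536870912 536870912 29 (by norm_num) (by norm_num) (by decide)

theorem pvCondC (a : Int) : (PySem.Int.band a 1015808 ≠ 0) ↔ ((pvN a &&& 1015808 : Nat) ≠ 0) := by
  have h1 : (1015808 : Int) = ((1015808 : Nat) : Int) := by norm_num
  rw [h1, pvBandToNat a 1015808 (by decide)]
  exact_mod_cast Iff.rfl

theorem pvSelf (a : Int) : pvN a &&& 1065353215 = pvN a := by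
  have h := pvBandToNat a 1065353215 (Nat.and_self _)
  have h2 : ((1065353215 : Nat) : Int) = bMask := by norm_num [bMask]
  rw [h2, pvBandMask] at h
  exact_mod_cast h.symm

-- linear-size unfolding step for A's filtered table
theorem pv_fm_cons {α β : Type} (p : α → Bool) (f : α → β) (x : α) (l : List α) :
    List.map f (List.filter p (x :: l)) =
      (if p x = true then [f x] else []) ++ List.map f (List.filter p l) := by
  by_cases h : p x <;> simp [h]

theorem pv_join0 (css : List (List Char)) : PySem.Chars.join [] css = css.flatten := by
  induction css with
  | nil => simp [PySem.Chars.join_nil]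
  | cons c t ih =>
    cases t with
    | nil => simp [PySem.Chars.join_singleton]
    | cons c2 t2 =>
      rw [PySem.Chars.join_cons_cons]
      simp only [List.flatten_cons]
      rw [ih]
      simp

-- join "" of two part-lists whose flattened characters agree gives equal strings
theorem pv_join_eq (l1 l2 : List String) (h : (l1.map String.toList).flatten = (l2.map String.toList).flatten) :
    PySem.Str.join "" l1 = PySem.Str.join "" l2 := by
  rw [← String.toList_inj, PySem.Str.toList_join, PySem.Str.toList_join]
  simpa [pv_join0] using h

set_option maxHeartbeats 1000000 in
theorem pvChainA_nil (a : Int) (h : pvN a = 0) :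
    (if Nat.testBit (pvN a) 0 = true then ["NF"] else []) ++ ((if Nat.testBit (pvN a) 1 = true then ["EZ"] else []) ++ ((if Nat.testBit (pvN a) 2 = true then ["TD"] else []) ++ ((if Nat.testBit (pvN a) 3 = true then ["HD"] else []) ++ ((if Nat.testBit (pvN a) 4 = true then ["HR"] else []) ++ ((if Nat.testBit (pvN a) 5 = true then ["SD"] else []) ++ ((if Nat.testBit (pvN a) 6 = true then ["DT"] else []) ++ ((if Nat.testBit (pvN a) 7 = true then ["RX"] else []) ++ ((if Nat.testBit (pvN a) 8 = true then ["HT"] else []) ++ ((if Nat.testBit (pvN a) 9 = true then ["NC"] else []) ++ ((if Nat.testBit (pvN a) 10 = true then ["FL"] else []) ++ ((if Nat.testBit (pvN a) 11 = true then ["AP"] else []) ++ ((if Nat.testBit (pvN a) 12 = true then ["SO"] else []) ++ ((if Nat.testBit (pvN a) 13 = true then ["AP"] else []) ++ ((if Nat.testBit (pvN a) 14 = true then ["PF"] else []) ++ ((if Nat.testBit (pvN a) 15 = true then ["4K"] else []) ++ ((if Nat.testBit (pvN a) 16 = true then ["5K"] else []) ++ ((if Nat.testBit (pvN a) 17 =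 true then ["6K"] else []) ++ ((if Nat.testBit (pvN a) 18 = true then ["7K"] else []) ++ ((if Nat.testBit (pvN a) 19 = true then ["8K"] else []) ++ ((if pvN a &&& 1015808 ≠ 0 then [""] else []) ++ ((if Nat.testBit (pvN a) 20 = true then ["FD"] else []) ++ ((if Nat.testBit (pvN a) 21 = true then ["RD"] else []) ++ ((if Nat.testBit (pvN a) 22 = true then ["CN"] else []) ++ ((if Nat.testBit (pvN a) 24 = true then ["9K"] else []) ++ ((if Nat.testBit (pvN a) 25 = true then ["10K"] else []) ++ ((if Nat.testBit (pvN a) 26 = true then ["1K"] else []) ++ ((if Nat.testBit (pvN a) 27 = true then ["3K"] else []) ++ ((if Nat.testBit (pvN a) 28 = true then ["2K"] else []) ++ ((if Nat.testBit (pvN a) 29 = true then ["V2"] else []) ++ []))))))))))))))))))))))))))))) = ([] : List String) := by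
  simp [h]

theorem pv_bfalse (c : Bool) (s : String) (h : (if c = true then [s] else ([] : List String)) = []) :
    c = false := by
  cases c
  · rfl
  · simp at h

theorem pv_testBit23 (a : Int) : Nat.testBit (pvN a) 23 = false := by
  have h := congrArg (fun n => Nat.testBit n 23) (pvSelf a)
  simp only [Nat.testBit_land] at h
  have h23 : Nat.testBit 1065353215 23 = false := by decide
  rw [h23, Bool.and_false] at h
  exact h.symm

theorem pv_testBit_ge30 (a : Int) (i : Nat) (hi : 30 ≤ i) : Nat.testBit (pvN a) i = false := by
  have hMi : Nat.testBit 1065353215 i = false := by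
    apply Nat.testBit_lt_two_pow
    calc (1065353215 : Nat) < 2 ^ 30 := by norm_num
      _ ≤ 2 ^ i := Nat.pow_le_pow_right (by omega) hi
  have h := congrArg (fun n => Nat.testBit n i) (pvSelf a)
  simp only [Nat.testBit_land, hMi, Bool.and_false] at h
  exact h.symm

set_option maxHeartbeats 1000000 in
theorem pvChainA_ne (a : Int) (h : pvN a ≠ 0) :
    (if Nat.testBit (pvN a) 0 = true then ["NF"] else []) ++ ((if Nat.testBit (pvN a) 1 = true then ["EZ"] else []) ++ ((if Nat.testBit (pvN a) 2 = true then ["TD"] else []) ++ ((if Nat.testBit (pvN a) 3 = true then ["HD"] else []) ++ ((if Nat.testBit (pvN a) 4 = true then ["HR"] else []) ++ ((if Nat.testBit (pvN a) 5 = true then ["SD"] else []) ++ ((if Nat.testBit (pvN a) 6 = true then ["DT"] else []) ++ ((if Nat.testBit (pvN a) 7 = true then ["RX"] else []) ++ ((if Nat.testBit (pvN a) 8 = true then ["HT"] else []) ++ ((if Nat.testBit (pvN a) 9 = true then ["NC"] else []) ++ ((if Nat.testBit (pvN a) 10 = true then ["FL"] else []) ++ ((if Nat.testBit (pvN a) 11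 = true then ["AP"] else []) ++ ((if Nat.testBit (pvN a) 12 = true then ["SO"] else []) ++ ((if Nat.testBit (pvN a) 13 = true then ["AP"] else []) ++ ((if Nat.testBit (pvN a) 14 = true then ["PF"] else []) ++ ((if Nat.testBit (pvN a) 15 = true then ["4K"] else []) ++ ((if Nat.testBit (pvN a) 16 = true then ["5K"] else []) ++ ((if Nat.testBit (pvN a) 17 = true then ["6K"] else []) ++ ((if Nat.testBit (pvN a) 18 = true then ["7K"] else []) ++ ((if Nat.testBit (pvN a) 19 = true then ["8K"] else []) ++ ((if pvN a &&& 1015808 ≠ 0 then [""] else []) ++ ((if Nat.testBit (pvN a) 20 = true then ["FD"] else []) ++ ((if Nat.testBit (pvN a) 21 = true then ["RD"] else []) ++ ((if Nat.testBit (pvN a) 22 = true then ["CN"] else []) ++ ((if Nat.testBit (pvN a) 24 = true then ["9K"] else []) ++ ((if Nat.testBit (pvN a) 25 = true then ["10K"] else []) ++ ((if Nat.testBit (pvN a) 26 = true then ["1K"] else []) ++ ((if Nat.testBit (pvN a) 27 = true then ["3K"] else []) ++ ((if Nat.testBit (pvN a) 28 = true then ["2K"] else []) ++ ((if Nat.testBit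 (pvN a) 29 = true then ["V2"] else []) ++ []))))))))))))))))))))))))))))) ≠ ([] : List String) := by
  intro hmods
  simp only [List.append_eq_nil_iff] at hmods
  obtain ⟨e0, e1, e2, e3, e4, e5, e6, e7, e8, e9, e10, e11, e12, e13, e14, e15, e16, e17, e18, e19, eC, e20, e21, e22, e24, e25, e26, e27, e28, e29, -⟩ := hmods
  apply h
  apply Nat.eq_of_testBit_eq
  intro i
  rw [Nat.zero_testBit]
  by_cases hi : i < 30
  · interval_cases i <;>
      first
        | exact pv_testBit23 a
        | exact pv_bfalse _ _ e0
        | exact pv_bfalse _ _ e1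
        | exact pv_bfalse _ _ e2
        | exact pv_bfalse _ _ e3
        | exact pv_bfalse _ _ e4
        | exact pv_bfalse _ _ e5
        | exact pv_bfalse _ _ e6
        | exact pv_bfalse _ _ e7
        | exact pv_bfalse _ _ e8
        | exact pv_bfalse _ _ e9
        | exact pv_bfalse _ _ e10
        | exact pv_bfalse _ _ e11
        | exact pv_bfalse _ _ e12
        | exact pv_bfalse _ _ e13
        | exact pv_bfalse _ _ e14
        | exact pv_bfalse _ _ e15
        | exact pv_bfalse _ _ e16
        | exact pv_bfalse _ _ e17
        | exact pv_bfalse _ _ e18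
        | exact pv_bfalse _ _ e19
        | exact pv_bfalse _ _ e20
        | exact pv_bfalse _ _ e21
        | exact pv_bfalse _ _ e22
        | exact pv_bfalse _ _ e24
        | exact pv_bfalse _ _ e25
        | exact pv_bfalse _ _ e26
        | exact pv_bfalse _ _ e27
        | exact pv_bfalse _ _ e28
        | exact pv_bfalse _ _ e29
        | exact pv_bfalse _ _ eC
  · exact pv_testBit_ge30 a i (by omega)

-- chars of the mod name for bit position i ([] where no mod uses the bit)
def pvNameL (i : Nat) : List Char :=
  match i with
  | 0 => "NF".toList | 1 => "EZ".toList | 2 => "TD".toList | 3 => "HD".toList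
  | 4 => "HR".toList | 5 => "SD".toList | 6 => "DT".toList | 7 => "RX".toList
  | 8 => "HT".toList | 9 => "NC".toList | 10 => "FL".toList | 11 => "AP".toList
  | 12 => "SO".toList | 13 => "AP".toList | 14 => "PF".toList | 15 => "4K".toList
  | 16 => "5K".toList | 17 => "6K".toList | 18 => "7K".toList | 19 => "8K".toList
  | 20 => "FD".toList | 21 => "RD".toList | 22 => "CN".toList | 24 => "9K".toList
  | 25 => "10K".toList | 26 => "1K".toList | 27 => "3K".toList | 28 => "2K".toList
  | 29 => "V2".toList | _ => []

-- canonical chars of one nibble-table entry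
def pvChunkL (p n : Nat) : List Char :=
  (if n.testBit 0 = true then pvNameL (4 * p) else []) ++
  ((if n.testBit 1 = true then pvNameL (4 * p + 1) else []) ++
  ((if n.testBit 2 = true then pvNameL (4 * p + 2) else []) ++
  ((if n.testBit 3 = true then pvNameL (4 * p + 3) else []) ++ [])))

-- B's table lookup, evaluated for every nibble position and value
set_option maxRecDepth 40000 in
theorem pvTable : ∀ p : Fin 8, ∀ n : Fin 16,
    ((PySem.List.pyGet? ((PySem.List.pyGet? bNibble ((p : Nat) : Int)).getD [])
      ((n : Nat) : Int)).getD "").toList = pvChunkL p n := by decide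

theorem pvTable' (pi : Int) (p n : Nat) (hpi : pi = (p : Int)) (hp : p < 8) (hn : n < 16) :
    ((PySem.List.pyGet? ((PySem.List.pyGet? bNibble pi).getD [])
      ((n : Nat) : Int)).getD "").toList = pvChunkL p n := by
  subst hpi
  exact pvTable ⟨p, hp⟩ ⟨n, hn⟩

theorem pvShiftCast (x k : Nat) : ((x : Int) >>> k) = ((x >>> k : Nat) : Int) := rfl

theorem pvNibLt (x k : Nat) : x >>> k &&& 15 < 16 := by
  have := Nat.and_le_right (n := x >>> k) (m := 15)
  omega

theorem pvNib0 (x k : Nat) : (x >>> k &&& 15).testBit 0 = x.testBit k := by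
  simp [Nat.testBit_and, Nat.testBit_shiftRight]
theorem pvNib1 (x k : Nat) : (x >>> k &&& 15).testBit 1 = x.testBit (k + 1) := by
  have h : Nat.testBit 15 1 = true := by decide
  simp [Nat.testBit_and, Nat.testBit_shiftRight, h]
theorem pvNib2 (x k : Nat) : (x >>> k &&& 15).testBit 2 = x.testBit (k + 2) := by
  have h : Nat.testBit 15 2 = true := by decide
  simp [Nat.testBit_and, Nat.testBit_shiftRight, h]
theorem pvNib3 (x k : Nat) : (x >>> k &&& 15).testBit 3 = x.testBit (k + 3) := by
  have h : Nat.testBit 15 3 = true := by decide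
  simp [Nat.testBit_and, Nat.testBit_shiftRight, h]

set_option maxHeartbeats 2000000 in
theorem get_mods_eq_alt (a : Int) : get_mods a = get_mods_alt a := by
  have hfold := PySem.List.foldl_append_if
    (fun p : Int × String => decide (PySem.Int.band a p.1 ≠ 0)) Prod.snd modDict []
  simp only [decide_eq_true_eq, List.nil_append] at hfold
  simp only [get_mods, get_mods_alt]
  rw [hfold]
  simp only [modDict, pv_fm_cons, List.filter_nil, List.map_nil, decide_eq_true_eq]
  simp only [pvCond_1 a, pvCond_2 a, pvCond_4 a, pvCond_8 a, pvCond_16 a, pvCond_32 a, pvCond_64 a, pvCond_128 a, pvCond_256 a, pvCond_512 a, pvCond_1024 a, pvCond_2048 a, pvCond_4096 a, pvCond_8192 a, pvCond_16384 a, pvCond_32768 a, pvCond_65536 a, pvCond_131072 a, pvCond_262144 a, pvCond_524288 a, pvCond_1048576 a, pvCond_2097152 a, pvCond_4194304 a, pvCond_16777216 a, pvCond_33554432 a, pvCond_67108864 a, pvCond_134217728 a, pvCond_268435456 a, pvCond_536870912 a, pvCondC a]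
  rw [pvBandMask a]
  by_cases hz : pvN a = 0
  · rw [pvChainA_nil a hz]
    rw [if_neg (by simp), if_pos (by simpa using hz)]
  · have hA := pvChainA_ne a hz
    have hB : ¬(((pvN a : Nat) : Int) = 0) := by simpa using hz
    rw [if_pos hA, if_neg hB]
    refine congrArg (fun s => "+" ++ PySem.Str.replace (PySem.Str.replace
      (PySem.Str.replace (PySem.Str.replace (PySem.Str.replace s "RXNC" "NCRX")
      "APNC" "NCAP") "HDHRNC" "HDNCHR") "NFNC" "NCNF") "DTNC" "NC") ?_
    rw [show PySem.List.pyRange 0 8 1 = [0, 1, 2, 3, 4, 5, 6, 7] from by decide]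
    simp only [List.map_cons, List.map_nil]
    rw [show ((4 : Int) * 0).toNat = 0 from by rfl,
        show ((4 : Int) * 1).toNat = 4 from by rfl,
        show ((4 : Int) * 2).toNat = 8 from by rfl,
        show ((4 : Int) * 3).toNat = 12 from by rfl,
        show ((4 : Int) * 4).toNat = 16 from by rfl,
        show ((4 : Int) * 5).toNat = 20 from by rfl,
        show ((4 : Int) * 6).toNat = 24 from by rfl,
        show ((4 : Int) * 7).toNat = 28 from by rfl]
    rw [pvShiftCast (pvN a) 0, pvShiftCast (pvN a) 4, pvShiftCast (pvN a) 8,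
        pvShiftCast (pvN a) 12, pvShiftCast (pvN a) 16, pvShiftCast (pvN a) 20,
        pvShiftCast (pvN a) 24, pvShiftCast (pvN a) 28]
    rw [show (15 : Int) = ((15 : Nat) : Int) from by rfl]
    simp only [PySem.Int.band_natCast]
    apply pv_join_eq
    simp only [List.map_append, List.map_cons, List.map_nil,
      apply_ite (List.map String.toList), List.flatten_append, List.flatten_cons,
      List.flatten_nil, apply_ite List.flatten, List.append_nil,
      show String.toList "" = ([] : List Char) from rfl, ite_self, List.nil_append]
    rw [pvTable' 0 0 _ (by norm_num) (by norm_num) (pvNibLt _ _),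
        pvTable' 1 1 _ (by norm_num) (by norm_num) (pvNibLt _ _),
        pvTable' 2 2 _ (by norm_num) (by norm_num) (pvNibLt _ _),
        pvTable' 3 3 _ (by norm_num) (by norm_num) (pvNibLt _ _),
        pvTable' 4 4 _ (by norm_num) (by norm_num) (pvNibLt _ _),
        pvTable' 5 5 _ (by norm_num) (by norm_num) (pvNibLt _ _),
        pvTable' 6 6 _ (by norm_num) (by norm_num) (pvNibLt _ _),
        pvTable' 7 7 _ (by norm_num) (by norm_num) (pvNibLt _ _)]
    simp only [pvChunkL, pvNib0, pvNib1, pvNib2, pvNib3]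
    norm_num [pvNameL]

-- ===== VERDICT (by name: the statement is the Claim_ definition above) =====
theorem get_mods_spec : Claim_equal_get_mods := by
  intro a _
  unfold Spec_get_mods
  exact get_mods_eq_alt a
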